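-- pv_equiv track=rewrite | github.com/morsuning/cryptography-gui-tool | algorithm/classical_cipher/permutation_cipher.py | msgToChunks
-- ===== SOURCE A (Python) =====
-- def msgToChunks(msg, key):
--         msg = msg.replace(' ', '')
--         while len(msg) % len(key) != 0:
--                 msg += ' '
--         chunks = []
--         for i in range(0, len(msg), len(key)):
--                 chunks.append(msg[i:i+len(key)])
--         return chunks
-- ===== SOURCE B (Python) =====
-- def msgToChunks(msg, key):
--     msg = msg.replace(' ', '')
--     k = len(key)
--     msg += ' ' * ((-len(msg)) % k)
--     chunks = []
--     while msg:
--         chunks.append(msg[:k])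
--         msg = msg[k:]
--     return chunks
-- ===== Notes on version B (the rewrite author's own statement) =====
-- stated objective: simpler
-- what changed: The one-space-at-a-time while-padding loop is replaced by a closed-form modular pad count ((-len)%k), and the index-range chunking loop by a head-consuming loop that repeatedly takes the first k characters; Pre_ excludes the empty key, on which both raise ZeroDivisionError.
import Mathlib
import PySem

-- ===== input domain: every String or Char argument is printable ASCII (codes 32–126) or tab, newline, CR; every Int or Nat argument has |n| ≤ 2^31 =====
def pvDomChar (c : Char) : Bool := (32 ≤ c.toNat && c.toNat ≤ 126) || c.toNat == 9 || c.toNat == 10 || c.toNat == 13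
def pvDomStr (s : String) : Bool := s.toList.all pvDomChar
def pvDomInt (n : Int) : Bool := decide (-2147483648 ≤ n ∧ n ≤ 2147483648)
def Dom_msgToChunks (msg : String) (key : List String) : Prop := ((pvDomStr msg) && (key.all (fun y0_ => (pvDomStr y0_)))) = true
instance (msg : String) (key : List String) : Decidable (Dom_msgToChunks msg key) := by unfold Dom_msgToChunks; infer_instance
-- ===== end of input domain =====

-- B replaces A's one-space-at-a-time padding loop by a closed-form modular pad count and
-- A's index-range chunking loop by a head-consuming take/drop loop (objective: simpler).


-- ===== PORT A =====
-- `while len(msg) % len(key) != 0: msg += ' '` (the k ≠ 0 part of the guard only makes the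
-- recursion total: Python raises ZeroDivisionError there, which Pre_ excludes)
def padA (m : List Char) (k : Nat) : List Char :=
  if h : k ≠ 0 ∧ m.length % k ≠ 0 then padA (m ++ [' ']) k else m
termination_by (k - m.length % k) % k
decreasing_by
  obtain ⟨hk, hr⟩ := h
  have hk0 : 0 < k := Nat.pos_of_ne_zero hk
  have hrk : m.length % k < k := Nat.mod_lt _ hk0
  have hk2 : 2 ≤ k := by omega
  have h1 : (m ++ [' ']).length % k = (m.length % k + 1) % k := by
    rw [List.length_append, List.length_singleton, Nat.add_mod, Nat.mod_eq_of_lt (by omega : 1 < k)]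
  by_cases hc : m.length % k + 1 = k
  · rw [h1, hc, Nat.mod_self, Nat.sub_zero, Nat.mod_self,
        Nat.mod_eq_of_lt (by omega : k - m.length % k < k)]
    omega
  · rw [h1, Nat.mod_eq_of_lt (by omega : m.length % k + 1 < k),
        Nat.mod_eq_of_lt (by omega : k - (m.length % k + 1) < k),
        Nat.mod_eq_of_lt (by omega : k - m.length % k < k)]
    omega

def msgToChunks (msg : String) (key : List String) : List String :=
  let m := (PySem.Str.replace msg " " "").toList
  let m := padA m key.length
  -- for i in range(0, len(msg), len(key)): chunks.append(msg[i:i+len(key)])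
  (PySem.List.pyRange 0 (m.length : Int) (key.length : Int)).foldl
    (fun chunks i =>
      chunks ++ [String.ofList (PySem.List.slice m (some i) (some (i + (key.length : Int))))]) []

-- ===== PORT B =====
-- `while msg: chunks.append(msg[:k]); msg = msg[k:]` — the slices msg[:k] / msg[k:] with a
-- nonnegative bound are exactly clamped take/drop; the k = 0 guard only makes the recursion
-- total (Python raises ZeroDivisionError before the loop there, excluded by Pre_)
def chunksB (k : Nat) (m : List Char) : List String :=
  if m = [] then [] else
  if k = 0 then [] else
    String.ofList (m.take k) :: chunksB k (m.drop k)
termination_by m.length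
decreasing_by
  have : m.length ≠ 0 := by simpa [List.length_eq_zero_iff] using ‹¬ m = []›
  simp only [List.length_drop]
  omega

def msgToChunks_alt (msg : String) (key : List String) : List String :=
  let m := (PySem.Str.replace msg " " "").toList
  -- msg += ' ' * ((-len(msg)) % k)
  let m := m ++ List.replicate ((PySem.Int.mod (-(m.length : Int)) (key.length : Int)).toNat) ' '
  chunksB key.length m

-- ===== PRECONDITION & SPEC =====
-- Pre_ excludes exactly key = [] (len(key) == 0), on which both Pythons raise ZeroDivisionError.
def Pre_msgToChunks (msg : String) (key : List String) : Prop := key ≠ []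
instance (msg : String) (key : List String) : Decidable (Pre_msgToChunks msg key) := by unfold Pre_msgToChunks; infer_instance

def pvWitness_msgToChunks : String × List String := ("ab c", ["x", "y"])

def Spec_msgToChunks (msg : String) (key : List String) (out : List String) : Prop := out = msgToChunks_alt msg key
instance (msg : String) (key : List String) (out : List String) : Decidable (Spec_msgToChunks msg key out) := by unfold Spec_msgToChunks; infer_instance

-- ===== CLAIM (what is proved, stated in full; the proofs are below) =====
def Claim_equal_msgToChunks : Prop := ∀ (msg : String) (key : List String), Dom_msgToChunks msg key → Pre_msgToChunks msg key → Spec_msgToChunks msg key (msgToChunks msg key)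

-- ===== LEMMAS AND PROOFS =====

-- A's padding loop appends exactly (k - len % k) % k spaces
theorem padA_eq (m : List Char) (k : Nat) (hk : k ≠ 0) :
    padA m k = m ++ List.replicate ((k - m.length % k) % k) ' ' := by
  induction m using padA.induct (k := k) with
  | case1 m h ih =>
    obtain ⟨hk', hr⟩ := h
    rw [padA, dif_pos ⟨hk', hr⟩, ih]
    have hk0 : 0 < k := Nat.pos_of_ne_zero hk'
    have hrk : m.length % k < k := Nat.mod_lt _ hk0
    have hk2 : 2 ≤ k := by omega
    have h1 : (m ++ [' ']).length % k = (m.length % k + 1) % k := by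
      rw [List.length_append, List.length_singleton, Nat.add_mod, Nat.mod_eq_of_lt (by omega : 1 < k)]
    by_cases hc : m.length % k + 1 = k
    · rw [h1, hc, Nat.mod_self, Nat.sub_zero, Nat.mod_self,
          Nat.mod_eq_of_lt (by omega : k - m.length % k < k)]
      have h2 : k - m.length % k = 1 := by omega
      simp [h2]
    · rw [h1, Nat.mod_eq_of_lt (by omega : m.length % k + 1 < k),
          Nat.mod_eq_of_lt (by omega : k - (m.length % k + 1) < k),
          Nat.mod_eq_of_lt (by omega : k - m.length % k < k)]
      have h2 : k - m.length % k = (k - (m.length % k + 1)) + 1 := by omega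
      rw [h2, List.append_assoc]
      congr 1
  | case2 m h =>
    rw [padA, dif_neg h]
    rcases not_and_or.mp h with h' | h'
    · exact absurd hk (by simpa using h')
    · have h0 : m.length % k = 0 := by simpa using h'
      simp [h0, Nat.mod_self]

-- B's closed-form pad count ((-len) % k, Python fmod) equals A's loop count
theorem pad_amount_eq (L k : Nat) (hk : k ≠ 0) :
    (PySem.Int.mod (-(L : Int)) (k : Int)).toNat = (k - L % k) % k := by
  have hk0 : 0 < k := Nat.pos_of_ne_zero hk
  have hrk : L % k < k := Nat.mod_lt _ hk0
  have hemod : PySem.Int.mod (-(L : Int)) (k : Int) = (-(L : Int)) % (k : Int) := by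
    rw [PySem.Int.mod, Int.fmod_eq_emod, if_pos (Or.inl (by positivity))]
    ring
  have hval : (-(L : Int)) % (k : Int) = (((k - L % k) % k : Nat) : Int) := by
    have hsplit : (-(L:Int)) = ((k:Int) - (L % k : Nat)) + (k:Int) * (-((L / k : Nat):Int) - 1) := by
      have h2 : ((k:Int)) * ((L / k : Nat):Int) + ((L % k : Nat):Int) = (L:Int) := by
        exact_mod_cast Nat.div_add_mod L k
      linarith
    rw [hsplit, Int.add_mul_emod_self_left]
    by_cases hr : L % k = 0
    · rw [hr, Nat.sub_zero, Nat.mod_self]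
      push_cast [hr]
      simp
    · rw [Nat.mod_eq_of_lt (by omega : k - L % k < k)]
      rw [Int.emod_eq_of_lt (by push_cast; omega) (by push_cast; omega)]
      push_cast; omega
  rw [hemod, hval]
  exact Int.toNat_natCast _

-- a foldl that appends singletons is a map
theorem foldl_app_singleton {α β : Type} (f : α → β) (l : List α) (acc : List β) :
    l.foldl (fun a i => a ++ [f i]) acc = acc ++ l.map f := by
  induction l generalizing acc with
  | nil => simp
  | cons x xs ih => simp [List.foldl_cons, ih]

-- A's range of chunk start indices
theorem pyRange_chunks (n k : Nat) (hk : k ≠ 0) :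
    PySem.List.pyRange 0 ((n * k : Nat) : Int) (k : Int) =
      (List.range n).map (fun j => ((k * j : Nat) : Int)) := by
  rw [PySem.List.pyRange_of_pos _ _ (by exact_mod_cast Nat.pos_of_ne_zero hk)]
  have hcount : (if (0 : Int) < ((n * k : Nat) : Int)
      then ((((n * k : Nat) : Int) - 0 + (k : Int) - 1) / (k : Int)).toNat else 0) = n := by
    by_cases hn : n = 0
    · subst hn; simp
    · have hpos : (0 : Int) < ((n * k : Nat) : Int) := by
        exact_mod_cast Nat.mul_pos (Nat.pos_of_ne_zero hn) (Nat.pos_of_ne_zero hk)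
      rw [if_pos hpos]
      have he : (((n * k : Nat) : Int) - 0 + (k : Int) - 1) = (((n * k + k - 1 : Nat)) : Int) := by
        push_cast [Nat.pos_of_ne_zero hk]
        omega
      rw [he]
      have hdiv : (n * k + k - 1) / k = n := by
        have h1 : n * k + k - 1 = (k - 1) + n * k := by
          have := Nat.pos_of_ne_zero hk; omega
        rw [h1, Nat.add_mul_div_right _ _ (Nat.pos_of_ne_zero hk),
            Nat.div_eq_of_lt (by omega)]
        omega
      rw [← Int.natCast_div, hdiv, Int.toNat_natCast]
  rw [hcount]
  apply List.map_congr_left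
  intro j _
  push_cast
  ring

-- B's chunk loop, characterised on an exactly-divisible list
theorem chunksB_eq (k : Nat) (hk : k ≠ 0) (n : Nat) (m : List Char) (hm : m.length = n * k) :
    chunksB k m = (List.range n).map (fun j => String.ofList ((m.drop (k * j)).take k)) := by
  induction n generalizing m with
  | zero =>
    have hnil : m = [] := List.eq_nil_of_length_eq_zero (by simpa using hm)
    subst hnil; rw [chunksB]; simp
  | succ n ih =>
    have hk0 : 0 < k := Nat.pos_of_ne_zero hk
    have hne : m ≠ [] := by
      intro h; subst h; simp at hm; omega
    rw [chunksB, if_neg hne, if_neg hk]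
    have hdrop : (m.drop k).length = n * k := by
      simp [List.length_drop, hm]
      ring_nf
      omega
    rw [ih (m.drop k) hdrop, List.range_succ_eq_map, List.map_cons, List.map_map]
    congr 1
    apply List.map_congr_left
    intro j _
    simp only [Function.comp]
    rw [List.drop_drop, show k + k * j = k * j.succ by rw [Nat.mul_succ]; omega]

-- the padded length is exactly divisible by k
theorem padded_div (L k : Nat) (hk : k ≠ 0) : k ∣ L + (k - L % k) % k := by
  have hk0 : 0 < k := Nat.pos_of_ne_zero hk
  have hrk : L % k < k := Nat.mod_lt _ hk0
  by_cases hr : L % k = 0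
  · simpa [hr] using Nat.dvd_of_mod_eq_zero hr
  · rw [Nat.mod_eq_of_lt (by omega : k - L % k < k)]
    apply Nat.dvd_of_mod_eq_zero
    rw [Nat.add_mod, Nat.mod_eq_of_lt (by omega : k - L % k < k),
        show L % k + (k - L % k) = k by omega, Nat.mod_self]

-- ===== VERDICT (by name: the statement is the Claim_ definition above) =====
theorem msgToChunks_spec : Claim_equal_msgToChunks := by
  intro msg key _ hpre
  unfold Spec_msgToChunks
  have hk : key.length ≠ 0 := by simpa [List.length_eq_zero_iff] using hpre
  simp only [msgToChunks, msgToChunks_alt]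
  rw [padA_eq _ _ hk, pad_amount_eq _ _ hk]
  set m0 := (PySem.Str.replace msg " " "").toList with hm0
  set m := m0 ++ List.replicate ((key.length - m0.length % key.length) % key.length) ' ' with hm
  obtain ⟨n, hn⟩ := padded_div m0.length key.length hk
  have hlen : m.length = m0.length + (key.length - m0.length % key.length) % key.length := by
    rw [hm, List.length_append, List.length_replicate]
  have hmn : m.length = n * key.length := by rw [hlen, hn, Nat.mul_comm]
  rw [hmn, pyRange_chunks n key.length hk, foldl_app_singleton, List.nil_append,
      chunksB_eq key.length hk n m hmn, List.map_map]
  apply List.map_congr_left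
  intro j _
  simp only [Function.comp]
  rw [PySem.List.slice_natCast_add]
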